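-- pv_equiv track=rewrite | github.com/shivamchopra98/final_pipeline | vuln_output/utils/dynamodb_utils.py | extract_threats_from_item
-- ===== SOURCE A (Python) =====
-- from typing import List, Dict, Any
--
-- def extract_threats_from_item(item: Dict[str, Any]) -> Dict[str, Dict]:
--     """
--     Build nested Threat JSON using prefixes. All fields from DynamoDB are mapped.
--     """
--
--     prefix_groups = {
--         "apt_": "APT",
--         "attackerkb_": "AttackerKB",
--         "chinese_": "Chinese",
--         "cisa_": "CISA",
--         "exploit_": "Exploit",
--         "exploitkit_": "ExploitKit",
--         "ibm_": "IBM",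
--         "intruder_": "Intruder",
--         "mcafee1_": "McAfee1",
--         "mcafee2_": "McAfee2",
--         "mcafee3_": "McAfee3",
--         "metasploit_": "Metasploit",
--         "notes": "Notes",
--         "nvd_": "NVD",
--         "packet_": "Packet",
--         "packetalone_": "PacketAlone",
--         "product_": "Product",
--         "ransomware_": "Ransomware",
--         "references": "References",
--         "threatinfo1_": "ThreatInfo1",
--         "threatinfo2_": "ThreatInfo2",
--         "threatinfo3_": "ThreatInfo3",
--         "threatinfo4_": "ThreatInfo4",
--         "threatinfo5_": "ThreatInfo5",
--         "top10ransomware_": "Top10Ransomware",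
--         "vendor_": "Vendor",
--         "weakness": "Weakness",
--         "weaknesses": "Weaknesses",
--     }
--
--     nested_threats = {}
--
--     for key, value in item.items():
--         matched = False
--         for prefix, group_name in prefix_groups.items():
--             if key.startswith(prefix):
--                 matched = True
--                 if group_name not in nested_threats:
--                     nested_threats[group_name] = {}
--                 nested_threats[group_name][key] = value
--                 break
--         # If no prefix matched, put it in "Misc"
--         if not matched:
--             if "Misc" not in nested_threats:
--                 nested_threats["Misc"] = {}
--             nested_threats["Misc"][key] = value
--
--     return nested_threats
-- ===== SOURCE B (Python) =====
-- from typing import List, Dict, Any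
--
-- PREFIX_GROUPS = {
--     "apt_": "APT",
--     "attackerkb_": "AttackerKB",
--     "chinese_": "Chinese",
--     "cisa_": "CISA",
--     "exploit_": "Exploit",
--     "exploitkit_": "ExploitKit",
--     "ibm_": "IBM",
--     "intruder_": "Intruder",
--     "mcafee1_": "McAfee1",
--     "mcafee2_": "McAfee2",
--     "mcafee3_": "McAfee3",
--     "metasploit_": "Metasploit",
--     "notes": "Notes",
--     "nvd_": "NVD",
--     "packet_": "Packet",
--     "packetalone_": "PacketAlone",
--     "product_": "Product",
--     "ransomware_": "Ransomware",
--     "references": "References",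
--     "threatinfo1_": "ThreatInfo1",
--     "threatinfo2_": "ThreatInfo2",
--     "threatinfo3_": "ThreatInfo3",
--     "threatinfo4_": "ThreatInfo4",
--     "threatinfo5_": "ThreatInfo5",
--     "top10ransomware_": "Top10Ransomware",
--     "vendor_": "Vendor",
--     "weakness": "Weakness",
--     "weaknesses": "Weaknesses",
-- }
--
--
-- def _classify(key: str) -> str:
--     """Group name of the first matching prefix, else 'Misc'."""
--     return next((g for p, g in PREFIX_GROUPS.items() if key.startswith(p)), "Misc")
--
--
-- def extract_threats_from_item(item: Dict[str, Any]) -> Dict[str, Dict]: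
--     # Staged passes: first the group order (first occurrence), then one
--     # comprehension per group collecting its keys in item order.
--     order = dict.fromkeys(_classify(k) for k in item)
--     return {g: {k: v for k, v in item.items() if _classify(k) == g}
--             for g in order}
-- ===== Notes on version B (the rewrite author's own statement) =====
-- stated objective: alternative
-- what changed: A's single pass with a matched flag and nested dict mutation is replaced by staged passes: a _classify helper (first matching prefix via next/find), dict.fromkeys to fix the group order, then one filtering comprehension per group; B never mutates a nested dict in place.
import Mathlib
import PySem

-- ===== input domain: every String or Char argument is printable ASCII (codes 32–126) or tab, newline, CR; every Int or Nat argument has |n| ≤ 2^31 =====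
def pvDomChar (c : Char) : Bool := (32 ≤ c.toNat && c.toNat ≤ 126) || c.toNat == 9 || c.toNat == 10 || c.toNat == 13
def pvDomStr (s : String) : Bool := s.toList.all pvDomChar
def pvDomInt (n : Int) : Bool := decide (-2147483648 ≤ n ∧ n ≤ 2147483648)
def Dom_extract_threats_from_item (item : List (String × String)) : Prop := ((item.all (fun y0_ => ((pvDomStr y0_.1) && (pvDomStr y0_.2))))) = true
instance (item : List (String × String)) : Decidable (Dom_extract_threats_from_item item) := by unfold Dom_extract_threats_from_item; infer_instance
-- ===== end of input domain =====

-- B groups by staged passes (classify each key, fix the group order, one filtering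
-- pass per group) instead of A's single mutating pass; same result, not faster.

-- the 28-entry prefix table, in the source's insertion order (identical literal in A and B)
def pvPrefixGroups : List (String × String) :=
  [("apt_", "APT"), ("attackerkb_", "AttackerKB"), ("chinese_", "Chinese"),
   ("cisa_", "CISA"), ("exploit_", "Exploit"), ("exploitkit_", "ExploitKit"),
   ("ibm_", "IBM"), ("intruder_", "Intruder"), ("mcafee1_", "McAfee1"),
   ("mcafee2_", "McAfee2"), ("mcafee3_", "McAfee3"), ("metasploit_", "Metasploit"),
   ("notes", "Notes"), ("nvd_", "NVD"), ("packet_", "Packet"),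
   ("packetalone_", "PacketAlone"), ("product_", "Product"), ("ransomware_", "Ransomware"),
   ("references", "References"), ("threatinfo1_", "ThreatInfo1"), ("threatinfo2_", "ThreatInfo2"),
   ("threatinfo3_", "ThreatInfo3"), ("threatinfo4_", "ThreatInfo4"), ("threatinfo5_", "ThreatInfo5"),
   ("top10ransomware_", "Top10Ransomware"), ("vendor_", "Vendor"),
   ("weakness", "Weakness"), ("weaknesses", "Weaknesses")]

-- ===== PORT A =====

-- 'if group_name not in nested: nested[group_name] = {}; nested[group_name][key] = value'
def pvAStore (nested : PySem.Dict String (PySem.Dict String String)) (g key value : String) :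
    PySem.Dict String (PySem.Dict String String) :=
  let nested := if nested.contains g = false then nested.insert g PySem.Dict.empty else nested
  nested.insert g ((nested.getD g PySem.Dict.empty).insert key value)

-- the inner 'for prefix, group_name in prefix_groups.items(): … break' (none = no prefix matched)
def pvAMatch (nested : PySem.Dict String (PySem.Dict String String)) (key value : String) :
    List (String × String) → Option (PySem.Dict String (PySem.Dict String String))
  | [] => none
  | (p, g) :: rest =>
    if PySem.Str.startswith key p then some (pvAStore nested g key value)
    else pvAMatch nested key value rest

def extract_threats_from_item (item : List (String × String)) : List (String × List (String × String)) :=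
  (item.foldl (fun nested kv =>
      match pvAMatch nested kv.1 kv.2 pvPrefixGroups with
      | some nested' => nested'
      | none => pvAStore nested "Misc" kv.1 kv.2)   -- 'if not matched: … "Misc" …'
    PySem.Dict.empty).items.map (fun p => (p.1, p.2.items))

-- ===== PORT B =====

-- 'next((g for p, g in PREFIX_GROUPS.items() if key.startswith(p)), "Misc")'
def pvClassify (key : String) : String :=
  ((pvPrefixGroups.find? (fun pg => PySem.Str.startswith key pg.1)).map (·.2)).getD "Misc"

-- '{k: v for k, v in item.items() if _classify(k) == g}'
def pvBucket (item : List (String × String)) (g : String) : PySem.Dict String String :=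
  item.foldl (fun d kv => if pvClassify kv.1 == g then d.insert kv.1 kv.2 else d) PySem.Dict.empty

def extract_threats_from_item_alt (item : List (String × String)) : List (String × List (String × String)) :=
  -- 'order = dict.fromkeys(_classify(k) for k in item)'; the outer dict comprehension
  -- ranges over the already-distinct groups of `order`, so its items are this map
  (PySem.Set.ofList (item.map (fun kv => pvClassify kv.1))).map
    (fun g => (g, (pvBucket item g).items))

-- ===== PRECONDITION & SPEC =====
def Spec_extract_threats_from_item (item : List (String × String)) (out : List (String × List (String × String))) : Prop := out = extract_threats_from_item_alt item
instance (item : List (String × String)) (out : List (String × List (String × String))) : Decidable (Spec_extract_threats_from_item item out) := by unfold Spec_extract_threats_from_item; infer_instance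

-- ===== CLAIM (what is proved, stated in full; the proofs are below) =====
def Claim_equal_extract_threats_from_item : Prop := ∀ (item : List (String × String)), Dom_extract_threats_from_item item → Spec_extract_threats_from_item item (extract_threats_from_item item)

-- ===== LEMMAS AND PROOFS =====

-- A's inner loop stores under the first matching prefix's group; none if no prefix matches
theorem pvAMatch_eq (nested : PySem.Dict String (PySem.Dict String String)) (key value : String)
    (ps : List (String × String)) :
    pvAMatch nested key value ps =
      (ps.find? (fun pg => PySem.Str.startswith key pg.1)).map (fun pg => pvAStore nested pg.2 key value) := by
  induction ps with
  | nil => rfl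
  | cons hd tl ih =>
    obtain ⟨p, g⟩ := hd
    cases hc : PySem.Str.startswith key p with
    | true =>
      rw [List.find?_cons_of_pos (p := fun pg : String × String => PySem.Str.startswith key pg.1) hc]
      simp only [pvAMatch, hc, if_pos, Option.map_some]
    | false =>
      rw [List.find?_cons_of_neg (p := fun pg : String × String => PySem.Str.startswith key pg.1) (ne_true_of_eq_false hc)]
      simp only [pvAMatch, hc, Bool.false_eq_true, if_neg, ih, not_false_eq_true]

-- hence A's per-item step is: store under the classification of the key
theorem pvAStep_eq (nested : PySem.Dict String (PySem.Dict String String)) (kv : String × String) :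
    (match pvAMatch nested kv.1 kv.2 pvPrefixGroups with
     | some nested' => nested'
     | none => pvAStore nested "Misc" kv.1 kv.2) =
    pvAStore nested (pvClassify kv.1) kv.1 kv.2 := by
  rw [pvAMatch_eq, pvClassify]
  cases pvPrefixGroups.find? (fun pg => PySem.Str.startswith kv.1 pg.1) <;> simp

-- a bucket over entries none of which classify to g is empty
theorem pvBucket_empty (l : List (String × String)) (g : String)
    (h : ∀ kv ∈ l, pvClassify kv.1 ≠ g) : pvBucket l g = PySem.Dict.empty := by
  induction l with
  | nil => rfl
  | cons hd tl ih =>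
    have hne : (pvClassify hd.1 == g) = false := by
      simpa using h hd (by simp)
    simp only [pvBucket, List.foldl_cons, hne, Bool.false_eq_true, if_neg, not_false_eq_true]
    exact ih (fun kv hkv => h kv (List.mem_cons_of_mem _ hkv))

theorem pvBucket_append_singleton (l : List (String × String)) (kv : String × String) (g : String) :
    pvBucket (l ++ [kv]) g =
      if pvClassify kv.1 == g then (pvBucket l g).insert kv.1 kv.2 else pvBucket l g := by
  simp [pvBucket, List.foldl_append]

-- pvAStore unfolded on each side of the 'group_name not in nested' test
theorem pvAStore_of_contains (N : PySem.Dict String (PySem.Dict String String))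
    (g k v : String) (hc : N.contains g = true) :
    pvAStore N g k v = N.insert g ((N.getD g PySem.Dict.empty).insert k v) := by
  simp [pvAStore, hc]

theorem pvAStore_of_not_contains (N : PySem.Dict String (PySem.Dict String String))
    (g k v : String) (hc : N.contains g = false) :
    pvAStore N g k v = N.insert g (PySem.Dict.empty.insert k v) := by
  simp [pvAStore, hc, PySem.Dict.insert_insert_self, PySem.Dict.getD_insert_self]

-- THE INVARIANT: A's nested dict after any list of (key, value) steps has exactly the
-- groups in first-occurrence order, each carrying B's bucket for that group
theorem pvGrouping (l : List (String × String)) :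
    (l.foldl (fun nested kv => pvAStore nested (pvClassify kv.1) kv.1 kv.2)
        PySem.Dict.empty).items
      = (PySem.Set.ofList (l.map (fun kv => pvClassify kv.1))).map
          (fun g => (g, pvBucket l g)) := by
  induction l using List.reverseRecOn with
  | nil => rfl
  | append_singleton l kv ih =>
    rw [List.foldl_append, List.foldl_cons, List.foldl_nil]
    have hkeys : (l.foldl (fun nested kv => pvAStore nested (pvClassify kv.1) kv.1 kv.2)
        PySem.Dict.empty).keys = PySem.Set.ofList (l.map (fun kv => pvClassify kv.1)) := by
      simp [PySem.Dict.keys, ih, List.map_map, Function.comp_def]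
    have hnodup : (l.foldl (fun nested kv => pvAStore nested (pvClassify kv.1) kv.1 kv.2)
        PySem.Dict.empty).keys.Nodup := hkeys ▸ PySem.Set.nodup_ofList _
    have horder' : PySem.Set.ofList ((l ++ [kv]).map (fun kv => pvClassify kv.1))
        = PySem.Set.add (PySem.Set.ofList (l.map (fun kv => pvClassify kv.1)))
            (pvClassify kv.1) := by
      simp [PySem.Set.ofList_eq_foldl, List.foldl_append]
    rw [horder']
    by_cases hmem : pvClassify kv.1 ∈ PySem.Set.ofList (l.map (fun kv => pvClassify kv.1))
    · -- the group already exists: A overwrites its entry in place, the order is unchanged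
      have hcont : (l.foldl (fun nested kv => pvAStore nested (pvClassify kv.1) kv.1 kv.2)
          PySem.Dict.empty).contains (pvClassify kv.1) = true := by
        rw [PySem.Dict.contains_iff_mem_keys, hkeys]; exact hmem
      have hgetD : (l.foldl (fun nested kv => pvAStore nested (pvClassify kv.1) kv.1 kv.2)
          PySem.Dict.empty).getD (pvClassify kv.1) PySem.Dict.empty
          = pvBucket l (pvClassify kv.1) :=
        PySem.Dict.getD_of_mem_items _
          (by rw [ih]; exact List.mem_map.mpr ⟨pvClassify kv.1, hmem, rfl⟩) hnodup _
      have hadd : PySem.Set.add (PySem.Set.ofList (l.map (fun kv => pvClassify kv.1)))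
          (pvClassify kv.1) = PySem.Set.ofList (l.map (fun kv => pvClassify kv.1)) := by
        simp [PySem.Set.add, PySem.Set.contains, hmem]
      rw [pvAStore_of_contains _ _ _ _ hcont,
          PySem.Dict.items_insert_of_contains _ _ hcont, hgetD, ih, List.map_map, hadd]
      apply List.map_congr_left
      intro g hg
      by_cases hgg : g = pvClassify kv.1
      · subst hgg; simp [pvBucket_append_singleton]
      · simp [pvBucket_append_singleton, Function.comp,
          show (g == pvClassify kv.1) = false by simpa using hgg,
          show (pvClassify kv.1 == g) = false by simpa using fun h => hgg h.symm]
    · -- fresh group: A appends it at the end with the one-entry dict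
      have hcont : (l.foldl (fun nested kv => pvAStore nested (pvClassify kv.1) kv.1 kv.2)
          PySem.Dict.empty).contains (pvClassify kv.1) = false := by
        rw [Bool.eq_false_iff, Ne, PySem.Dict.contains_iff_mem_keys, hkeys]; exact hmem
      have hadd : PySem.Set.add (PySem.Set.ofList (l.map (fun kv => pvClassify kv.1)))
          (pvClassify kv.1)
          = PySem.Set.ofList (l.map (fun kv => pvClassify kv.1)) ++ [pvClassify kv.1] := by
        simp [PySem.Set.add, PySem.Set.contains, hmem]
      have hfresh : ∀ kv' ∈ l, pvClassify kv'.1 ≠ pvClassify kv.1 := by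
        intro kv' hkv' heq
        exact hmem ((PySem.Set.mem_ofList _ _).mpr (List.mem_map.mpr ⟨kv', hkv', heq⟩))
      rw [pvAStore_of_not_contains _ _ _ _ hcont,
          PySem.Dict.items_insert_of_not_contains _ _ hcont, ih, hadd,
          List.map_append, List.map_singleton]
      congr 1
      · apply List.map_congr_left
        intro g hg
        have hne : pvClassify kv.1 ≠ g := fun h => hmem (h ▸ hg)
        simp [pvBucket_append_singleton, show (pvClassify kv.1 == g) = false by simpa using hne]
      · rw [pvBucket_append_singleton]
        simp [pvBucket_empty l (pvClassify kv.1) hfresh]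

-- ===== VERDICT (by name: the statement is the Claim_ definition above) =====
theorem extract_threats_from_item_spec : Claim_equal_extract_threats_from_item := by
  intro item _
  unfold Spec_extract_threats_from_item
  unfold extract_threats_from_item extract_threats_from_item_alt
  have hstep : (item.foldl (fun nested kv =>
      match pvAMatch nested kv.1 kv.2 pvPrefixGroups with
      | some nested' => nested'
      | none => pvAStore nested "Misc" kv.1 kv.2) PySem.Dict.empty)
      = item.foldl (fun nested kv => pvAStore nested (pvClassify kv.1) kv.1 kv.2)
          PySem.Dict.empty := by
    apply PySem.List.foldl_congr_mem
    intro nested kv _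
    exact pvAStep_eq nested kv
  rw [hstep, pvGrouping, List.map_map]
  rfl
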